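-- pv_equiv track=rewrite | github.com/itsmebalaji80-design/AI-DOCUMENTATION-AUDITOR-PROJECT | New folder/backend/app/parsers/api.py | _paren_balanced_chunk
-- ===== SOURCE A (Python) =====
-- def _paren_balanced_chunk(lines: list[str], start_idx: int) -> int:
--     # Start at first match line and scan until we close the initial call.
--     depth = 0
--     started = False
--     for i in range(start_idx, len(lines)):
--         for ch in lines[i]:
--             if ch == "(":
--                 depth += 1
--                 started = True
--             elif ch == ")":
--                 depth -= 1
--         if started and depth <= 0:
--             return i
--     return min(len(lines) - 1, start_idx + 60)
-- ===== SOURCE B (Python) =====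
-- def _paren_balanced_chunk(lines: list[str], start_idx: int) -> int:
--     # Staged algorithm: (1) locate the first line at/after start_idx that opens a
--     # parenthesis; (2) scan prefix sums of per-line paren deltas from there for the
--     # first nonpositive one.  No per-character loop and no 'started' flag: before the
--     # first '(' line A can never return, so the staged search is exact.
--     fallback = min(len(lines) - 1, start_idx + 60)
--     n = len(lines)
--     f = next((i for i in range(start_idx, n) if "(" in lines[i]), None)
--     if f is None:
--         return fallback
--     depth = sum(lines[j].count("(") - lines[j].count(")") for j in range(start_idx, f))
--     for i in range(f, n):
--         depth += lines[i].count("(") - lines[i].count(")")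
--         if depth <= 0:
--             return i
--     return fallback
-- ===== Notes on version B (the rewrite author's own statement) =====
-- stated objective: alternative
-- what changed: A's single pass with a per-character loop and a 'started' flag is replaced by a staged algorithm: first locate the first line at/after start_idx containing '(', then scan prefix sums of per-line paren deltas from that line; the 'started' state and the inner character branching loop disappear in favour of str 'in'/count aggregates.
import Mathlib
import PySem

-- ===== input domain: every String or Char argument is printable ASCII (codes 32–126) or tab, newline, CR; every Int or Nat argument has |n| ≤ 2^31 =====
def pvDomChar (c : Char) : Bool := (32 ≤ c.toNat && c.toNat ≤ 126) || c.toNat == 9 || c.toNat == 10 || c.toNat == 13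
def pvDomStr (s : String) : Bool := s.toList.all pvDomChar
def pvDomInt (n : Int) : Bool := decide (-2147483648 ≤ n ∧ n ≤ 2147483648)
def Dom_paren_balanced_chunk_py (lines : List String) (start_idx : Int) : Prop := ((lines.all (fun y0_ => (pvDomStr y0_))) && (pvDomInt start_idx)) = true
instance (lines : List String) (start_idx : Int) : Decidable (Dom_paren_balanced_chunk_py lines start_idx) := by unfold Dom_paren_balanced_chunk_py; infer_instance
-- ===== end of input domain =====

-- B replaces A's single pass (per-character loop + 'started' flag) by a staged algorithm: find the first line at/after start_idx containing '(', then scan prefix sums of per-line paren deltas from there — alternative decomposition, same cost.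


-- ===== PORT A =====
-- per-character state update: if ch == '(': depth += 1; started = True; elif ch == ')': depth -= 1
def pvAChar (st : Int × Bool) (c : Char) : Int × Bool :=
  if c = '(' then (st.1 + 1, true)
  else if c = ')' then (st.1 - 1, st.2)
  else st

-- the 'for i in range(start_idx, len(lines))' loop; none = loop fell through
def pvALoop (lines : List String) (idxs : List Int) (depth : Int) (started : Bool) : Option Int :=
  match idxs with
  | [] => none
  | i :: rest =>
    let st := ((PySem.List.pyGet? lines i).getD "").toList.foldl pvAChar (depth, started)
    if st.2 && decide (st.1 ≤ 0) then some i else pvALoop lines rest st.1 st.2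

def paren_balanced_chunk_py (lines : List String) (start_idx : Int) : Int :=
  match pvALoop lines (PySem.List.pyRange start_idx (lines.length : Int) 1) 0 false with
  | some i => i
  | none => min ((lines.length : Int) - 1) (start_idx + 60)

-- ===== PORT B =====
-- stage 1: next((i for i in range(start_idx, n) if "(" in lines[i]), None)
def pvBFind (lines : List String) (idxs : List Int) : Option Int :=
  match idxs with
  | [] => none
  | i :: rest =>
    if PySem.Str.isIn "(" ((PySem.List.pyGet? lines i).getD "") then some i
    else pvBFind lines rest

-- lines[i].count("(") - lines[i].count(")")
def pvBDelta (lines : List String) (i : Int) : Int :=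
  let line := (PySem.List.pyGet? lines i).getD ""
  (PySem.Str.count line "(" : Int) - (PySem.Str.count line ")" : Int)

-- stage 2: first i in range(f, n) where the running prefix sum of deltas is <= 0
def pvBScan (lines : List String) (idxs : List Int) (depth : Int) : Option Int :=
  match idxs with
  | [] => none
  | i :: rest =>
    let depth' := depth + pvBDelta lines i
    if depth' ≤ 0 then some i else pvBScan lines rest depth'

def paren_balanced_chunk_py_alt (lines : List String) (start_idx : Int) : Int :=
  let fallback := min ((lines.length : Int) - 1) (start_idx + 60)
  match pvBFind lines (PySem.List.pyRange start_idx (lines.length : Int) 1) with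
  | none => fallback
  | some f =>
    let depth := (PySem.List.pyRange start_idx f 1).foldl (fun acc j => acc + pvBDelta lines j) 0
    match pvBScan lines (PySem.List.pyRange f (lines.length : Int) 1) depth with
    | some i => i
    | none => fallback

-- ===== PRECONDITION & SPEC =====
-- Pre_ excludes exactly the inputs where Python A raises IndexError (lines[i] with i < -len(lines)).
def Pre_paren_balanced_chunk_py (lines : List String) (start_idx : Int) : Prop :=
  -(lines.length : Int) ≤ start_idx
instance (lines : List String) (start_idx : Int) : Decidable (Pre_paren_balanced_chunk_py lines start_idx) := by unfold Pre_paren_balanced_chunk_py; infer_instance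
def pvWitness_paren_balanced_chunk_py : List String × Int := (["def f(", "  x)", "y"], 0)

def Spec_paren_balanced_chunk_py (lines : List String) (start_idx : Int) (out : Int) : Prop := out = paren_balanced_chunk_py_alt lines start_idx
instance (lines : List String) (start_idx : Int) (out : Int) : Decidable (Spec_paren_balanced_chunk_py lines start_idx out) := by unfold Spec_paren_balanced_chunk_py; infer_instance

-- ===== CLAIM (what is proved, stated in full; the proofs are below) =====
def Claim_equal_paren_balanced_chunk_py : Prop := ∀ (lines : List String) (start_idx : Int), Dom_paren_balanced_chunk_py lines start_idx → Pre_paren_balanced_chunk_py lines start_idx → Spec_paren_balanced_chunk_py lines start_idx (paren_balanced_chunk_py lines start_idx)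

-- ===== LEMMAS AND PROOFS =====

-- CPython substring count specialised to a single-character needle is the character count.
theorem pv_count_go_single (c : Char) (l : List Char) (fuel acc : Nat) (h : l.length ≤ fuel) :
    PySem.Chars.count.go [c] fuel l acc = acc + l.count c := by
  induction l generalizing fuel acc with
  | nil => cases fuel <;> simp [PySem.Chars.count.go]
  | cons hd t ih =>
    cases fuel with
    | zero => simp at h
    | succ f =>
      simp only [List.length_cons] at h
      simp only [PySem.Chars.count.go]
      by_cases hc : c = hd
      · subst hc
        rw [if_pos (by simp [List.isPrefixOf])]
        rw [show List.drop (List.length [c]) (c :: t) = t from by simp]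
        rw [ih f (acc + 1) (by omega), List.count_cons]
        simp; omega
      · rw [if_neg (by simp [List.isPrefixOf, hc])]
        rw [ih f acc (by omega), List.count_cons]
        simp [Ne.symm hc]

theorem pv_count_single (s : String) (c : Char) (cs : String) (hcs : cs.toList = [c]) :
    PySem.Str.count s cs = s.toList.count c := by
  rw [PySem.Str.count_eq, hcs]
  unfold PySem.Chars.count
  rw [if_neg (by simp)]
  simpa using pv_count_go_single c s.toList s.toList.length 0 le_rfl

theorem pv_isIn_single (s : String) (c : Char) (cs : String) (hcs : cs.toList = [c]) :
    PySem.Str.isIn cs s = s.toList.contains c := by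
  by_cases hm : c ∈ s.toList
  · have h1 : PySem.Chars.isIn cs.toList s.toList = true := by
      rw [PySem.Chars.isIn_iff_infix]
      obtain ⟨pre, suf, hps⟩ := List.append_of_mem hm
      exact ⟨pre, suf, by rw [hcs, hps]; simp⟩
    simp only [PySem.Str.isIn_eq, h1]
    simp [hm]
  · have h1 : PySem.Chars.isIn cs.toList s.toList = false := by
      rw [PySem.Chars.isIn_eq_false_iff, hcs]
      intro hi
      exact hm (hi.subset (by simp))
    simp only [PySem.Str.isIn_eq, h1]
    simp [hm]

-- A's per-character fold over one line computes the line's aggregate delta and '(' presence.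
theorem pv_line_fold (cs : List Char) (d : Int) (s : Bool) :
    cs.foldl pvAChar (d, s)
      = (d + (cs.count '(' : Int) - (cs.count ')' : Int), s || cs.contains '(') := by
  induction cs generalizing d s with
  | nil => simp
  | cons c t ih =>
    simp only [List.foldl_cons, List.count_cons, List.contains_cons]
    by_cases h1 : c = '('
    · subst h1
      rw [show pvAChar (d, s) '(' = (d + 1, true) from by simp [pvAChar]]
      rw [ih]
      simp [Prod.ext_iff]; omega
    · by_cases h2 : c = ')'
      · subst h2
        rw [show pvAChar (d, s) ')' = (d - 1, s) from by simp [pvAChar]]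
        rw [ih]
        simp [Prod.ext_iff]; omega
      · rw [show pvAChar (d, s) c = (d, s) from by simp [pvAChar, h1, h2]]
        rw [ih]
        have e1 : ('(' == c) = false := by simp [Ne.symm h1]
        have e2 : (c == '(') = false := by simp [h1]
        have e3 : (c == ')') = false := by simp [h2]
        simp [e1, e2, e3]

-- the delta computed from string counts equals the one from character counts
theorem pv_delta_eq (lines : List String) (i : Int) :
    pvBDelta lines i
      = (((PySem.List.pyGet? lines i).getD "").toList.count '(' : Int)
        - (((PySem.List.pyGet? lines i).getD "").toList.count ')' : Int) := by
  show (PySem.Str.count ((PySem.List.pyGet? lines i).getD "") "(" : Int)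
      - (PySem.Str.count ((PySem.List.pyGet? lines i).getD "") ")" : Int) = _
  rw [pv_count_single _ '(' "(" rfl, pv_count_single _ ')' ")" rfl]

-- once 'started' is true, A's remaining loop is exactly B's prefix-sum scan
theorem pv_loop_true_eq_scan (lines : List String) (idxs : List Int) (d : Int) :
    pvALoop lines idxs d true = pvBScan lines idxs d := by
  induction idxs generalizing d with
  | nil => rfl
  | cons i rest ih =>
    simp only [pvALoop, pvBScan, pv_line_fold, pv_delta_eq, Bool.true_or, Bool.true_and,
      decide_eq_true_eq, add_sub_assoc, ih]

theorem pv_find_mem (lines : List String) (idxs : List Int) (f : Int)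
    (h : pvBFind lines idxs = some f) : f ∈ idxs := by
  induction idxs with
  | nil => simp [pvBFind] at h
  | cons i rest ih =>
    simp only [pvBFind] at h
    split at h
    · simp at h; simp [h]
    · simp [ih h]

-- the central staging lemma: A's one-pass loop from a fresh state equals B's two stages
theorem pv_key (lines : List String) (k : Nat) : ∀ (a b d : Int), (b - a).toNat = k →
    pvALoop lines (PySem.List.pyRange a b 1) d false
      = match pvBFind lines (PySem.List.pyRange a b 1) with
        | none => none
        | some f => pvBScan lines (PySem.List.pyRange f b 1)
            (d + ((PySem.List.pyRange a f 1).map (pvBDelta lines)).sum) := by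
  induction k with
  | zero =>
    intro a b d hk
    rw [PySem.List.pyRange_one_eq_nil (by omega)]
    rfl
  | succ k ih =>
    intro a b d hk
    have hab : a < b := by omega
    rw [PySem.List.pyRange_one_cons hab]
    simp only [pvALoop, pvBFind, pv_line_fold, Bool.false_or]
    rw [pv_isIn_single _ '(' "(" rfl]
    by_cases hc : (((PySem.List.pyGet? lines a).getD "").toList.contains '(') = true
    · -- first '(' line found at a: B's scan starts here with depth d
      rw [hc]
      simp only [if_true, Bool.true_and, decide_eq_true_eq]
      rw [show PySem.List.pyRange a a 1 = [] from PySem.List.pyRange_one_eq_nil le_rfl]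
      rw [PySem.List.pyRange_one_cons hab]
      simp only [List.map_nil, List.sum_nil, add_zero, pvBScan, pv_delta_eq,
        add_sub_assoc, pv_loop_true_eq_scan]
    · -- no '(' yet: A keeps started = false; fold its delta into d and recurse
      have hcf : (((PySem.List.pyGet? lines a).getD "").toList.contains '(') = false := by
        simpa using hc
      rw [hcf]
      simp only [Bool.false_and, if_false, Bool.false_eq_true]
      rw [ih (a + 1) b (d + ((((PySem.List.pyGet? lines a).getD "").toList.count '(' : Int))
          - (((PySem.List.pyGet? lines a).getD "").toList.count ')' : Int)) (by omega)]
      cases hf : pvBFind lines (PySem.List.pyRange (a + 1) b 1) with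
      | none => simp
      | some f =>
        have hmem := pv_find_mem lines _ f hf
        rw [PySem.List.mem_pyRange_one] at hmem
        dsimp only
        rw [show PySem.List.pyRange a f 1 = a :: PySem.List.pyRange (a + 1) f 1 from
          PySem.List.pyRange_one_cons (by omega)]
        simp only [List.map_cons, List.sum_cons, pv_delta_eq, add_sub_assoc]
        congr 1
        omega

-- ===== VERDICT (by name: the statement is the Claim_ definition above) =====
theorem paren_balanced_chunk_py_spec : Claim_equal_paren_balanced_chunk_py := by
  intro lines start_idx _ _
  unfold Spec_paren_balanced_chunk_py paren_balanced_chunk_py paren_balanced_chunk_py_alt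
  rw [pv_key lines ((lines.length : Int) - start_idx).toNat start_idx (lines.length : Int) 0 rfl]
  cases hf : pvBFind lines (PySem.List.pyRange start_idx (lines.length : Int) 1) with
  | none => rfl
  | some f =>
    dsimp only
    rw [PySem.List.foldl_add (g := pvBDelta lines), zero_add]
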